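-- pv_equiv track=rewrite | github.com/ManuelLoaizaV/ine018-unmsm | tareas/2/24190298/sesión 14/sesion14.py | ConvertirMayusculas
-- ===== SOURCE A (Python) =====
-- def ConvertirMayusculas(s):
--     n=len(s)
--     cadenafinal=""
--     for i in range(0,n):
--         if 'a'<= s[i]<= 'z':
--             cadenafinal= cadenafinal+chr(ord(s[i])-ord('a')+ ord('A'))
--         else:
--             cadenafinal=cadenafinal+s[i]
--     return cadenafinal
-- ===== SOURCE B (Python) =====
-- def ConvertirMayusculas(s):
--     table = {c: c - (ord('a') - ord('A')) for c in range(ord('a'), ord('z') + 1)}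
--     return s.translate(table)
-- ===== Notes on version B (the rewrite author's own statement) =====
-- stated objective: idiomatic
-- what changed: Replaces the index loop with per-character branching and quadratic string concatenation by a precomputed lowercase-to-uppercase translation table applied in one str.translate call (ASCII a-z only, so non-ASCII stays untouched like in A).
import Mathlib
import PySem

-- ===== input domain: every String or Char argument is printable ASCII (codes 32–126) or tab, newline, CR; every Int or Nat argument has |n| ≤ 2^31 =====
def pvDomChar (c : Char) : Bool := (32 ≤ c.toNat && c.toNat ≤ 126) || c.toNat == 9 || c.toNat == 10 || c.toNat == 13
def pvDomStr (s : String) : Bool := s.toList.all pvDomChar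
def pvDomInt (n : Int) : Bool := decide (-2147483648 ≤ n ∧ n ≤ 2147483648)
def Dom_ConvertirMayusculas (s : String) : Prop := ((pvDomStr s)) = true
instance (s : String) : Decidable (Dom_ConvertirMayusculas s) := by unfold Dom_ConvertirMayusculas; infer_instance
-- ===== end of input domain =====

-- B replaces A's index loop (branch + string concatenation per character) by a precomputed
-- lowercase→uppercase translation table applied in one pass (str.translate).

-- ===== PORT A =====
def ConvertirMayusculas (s : String) : String :=
  let cs := s.toList
  let n : Int := cs.length
  String.mk ((PySem.List.pyRange 0 n 1).foldl (fun acc i =>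
    if 'a' ≤ PySem.List.pyGetD cs i ' ' ∧ PySem.List.pyGetD cs i ' ' ≤ 'z' then
      acc ++ [Char.ofNat (((PySem.List.pyGetD cs i ' ').toNat : Int) - ('a'.toNat : Int) + ('A'.toNat : Int)).toNat]
    else
      acc ++ [PySem.List.pyGetD cs i ' ']) [])

-- ===== PORT B =====
-- the translation table {ord('a')+k ↦ ord('A')+k}
def pvUpperTable : PySem.Dict Int Int :=
  PySem.Dict.ofList ((PySem.List.pyRange ('a'.toNat : Int) (('z'.toNat : Int) + 1) 1).map
    (fun c => (c, c - (('a'.toNat : Int) - ('A'.toNat : Int)))))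

-- s.translate(table): each character is mapped through the table, absent keys stay
def ConvertirMayusculas_alt (s : String) : String :=
  String.mk (s.toList.map (fun ch =>
    match pvUpperTable.get? (ch.toNat : Int) with
    | some v => Char.ofNat v.toNat
    | none => ch))

-- ===== PRECONDITION & SPEC =====
def Spec_ConvertirMayusculas (s : String) (out : String) : Prop := out = ConvertirMayusculas_alt s
instance (s : String) (out : String) : Decidable (Spec_ConvertirMayusculas s out) := by unfold Spec_ConvertirMayusculas; infer_instance

-- ===== CLAIM (what is proved, stated in full; the proofs are below) =====
def Claim_equal_ConvertirMayusculas : Prop := ∀ (s : String), Dom_ConvertirMayusculas s → Spec_ConvertirMayusculas s (ConvertirMayusculas s)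

-- ===== LEMMAS AND PROOFS =====

-- closed form of the table lookup
set_option maxHeartbeats 1000000 in
theorem pvUpperTable_get? (k : Int) :
    pvUpperTable.get? k = if 97 ≤ k ∧ k < 123 then some (k - 32) else none := by
  have h : pvUpperTable = PySem.Dict.mk
      [(97, 65), (98, 66), (99, 67), (100, 68), (101, 69), (102, 70), (103, 71), (104, 72),
       (105, 73), (106, 74), (107, 75), (108, 76), (109, 77), (110, 78), (111, 79), (112, 80),
       (113, 81), (114, 82), (115, 83), (116, 84), (117, 85), (118, 86), (119, 87), (120, 88),
       (121, 89), (122, 90)] := by decide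
  rw [h]
  by_cases hk : 97 ≤ k ∧ k < 123
  · rw [if_pos hk]
    obtain ⟨h1, h2⟩ := hk
    interval_cases k <;> decide
  · rw [if_neg hk]
    simp only [PySem.Dict.get?_mk_cons, beq_iff_eq]
    repeat rw [if_neg (by omega)]
    rfl

-- per-character agreement of the two transformations
theorem pv_char_eq (c : Char) :
    (if 'a' ≤ c ∧ c ≤ 'z' then
      Char.ofNat ((c.toNat : Int) - ('a'.toNat : Int) + ('A'.toNat : Int)).toNat
     else c)
    = (match pvUpperTable.get? ((c.toNat : Int)) with
       | some v => Char.ofNat v.toNat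
       | none => c) := by
  rw [pvUpperTable_get?]
  have ha : 'a'.toNat = 97 := rfl
  have hz : 'z'.toNat = 122 := rfl
  have hA : 'A'.toNat = 65 := rfl
  have hle : ('a' ≤ c ∧ c ≤ 'z') ↔ (97 ≤ (c.toNat : Int) ∧ (c.toNat : Int) < 123) := by
    constructor
    · rintro ⟨h1, h2⟩
      have h1' : 'a'.toNat ≤ c.toNat := h1
      have h2' : c.toNat ≤ 'z'.toNat := h2
      rw [ha] at h1'; rw [hz] at h2'
      constructor <;> omega
    · rintro ⟨h1, h2⟩
      constructor
      · show 'a'.toNat ≤ c.toNat; omega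
      · show c.toNat ≤ 'z'.toNat; omega
  by_cases h : 'a' ≤ c ∧ c ≤ 'z'
  · rw [if_pos h, if_pos (hle.mp h)]
    congr 1
    have := hle.mp h
    omega
  · rw [if_neg h, if_neg (fun hk => h (hle.mpr hk))]

theorem ConvertirMayusculas_eq_map (s : String) :
    ConvertirMayusculas s = String.mk (s.toList.map (fun c =>
      if 'a' ≤ c ∧ c ≤ 'z' then
        Char.ofNat ((c.toNat : Int) - ('a'.toNat : Int) + ('A'.toNat : Int)).toNat
      else c)) := by
  have hbody : (fun (acc : List Char) (i : Int) =>
      if 'a' ≤ PySem.List.pyGetD s.toList i ' ' ∧ PySem.List.pyGetD s.toList i ' ' ≤ 'z' then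
        acc ++ [Char.ofNat (((PySem.List.pyGetD s.toList i ' ').toNat : Int) - ('a'.toNat : Int) + ('A'.toNat : Int)).toNat]
      else acc ++ [PySem.List.pyGetD s.toList i ' '])
      = (fun acc i => acc ++ [(fun c => if 'a' ≤ c ∧ c ≤ 'z' then
          Char.ofNat ((c.toNat : Int) - ('a'.toNat : Int) + ('A'.toNat : Int)).toNat
          else c) (PySem.List.pyGetD s.toList i ' ')]) := by
    funext acc i
    show _ = acc ++ [if 'a' ≤ PySem.List.pyGetD s.toList i ' ' ∧ PySem.List.pyGetD s.toList i ' ' ≤ 'z' then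
        Char.ofNat (((PySem.List.pyGetD s.toList i ' ').toNat : Int) - ('a'.toNat : Int) + ('A'.toNat : Int)).toNat
        else PySem.List.pyGetD s.toList i ' ']
    split_ifs <;> rfl
  show String.mk ((PySem.List.pyRange 0 (s.toList.length : Int) 1).foldl (fun acc i =>
      if 'a' ≤ PySem.List.pyGetD s.toList i ' ' ∧ PySem.List.pyGetD s.toList i ' ' ≤ 'z' then
        acc ++ [Char.ofNat (((PySem.List.pyGetD s.toList i ' ').toNat : Int) - ('a'.toNat : Int) + ('A'.toNat : Int)).toNat]
      else acc ++ [PySem.List.pyGetD s.toList i ' ']) []) = _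
  rw [hbody, PySem.List.foldl_append_singleton_eq_map, List.nil_append]
  conv_rhs => rw [← PySem.List.map_pyGetD_pyRange_zero' s.toList ' ', List.map_map]
  rfl

-- ===== VERDICT (by name: the statement is the Claim_ definition above) =====
set_option maxHeartbeats 1000000 in
theorem ConvertirMayusculas_spec : Claim_equal_ConvertirMayusculas := by
  intro s _
  show ConvertirMayusculas s = ConvertirMayusculas_alt s
  rw [ConvertirMayusculas_eq_map]
  unfold ConvertirMayusculas_alt
  congr 1
  apply List.map_congr_left
  intro c _
  exact pv_char_eq c
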